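-- pv_equiv track=rewrite | github.com/melbi4ka/JavaScriptBasics | list_advanced/number _classification.py | number_classification
-- ===== SOURCE A (Python) =====
-- def number_classification(nums):
--     nums_list_positive = [str(n) for n in nums if n >= 0]
--     nums_list_negative = [str(n) for n in nums if n < 0]
--     nums_list_even = [str(n) for n in nums if n % 2 == 0]
--     nums_list_odd = [str(n) for n in nums if n % 2 != 0]
--
--     return f"Positive: {', '.join(nums_list_positive)}\n"\
--            f"Negative: {', '.join(nums_list_negative)}\n"\
--            f"Even: {', '.join(nums_list_even)}\n"\
--            f"Odd: {', '.join(nums_list_odd)}"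
-- ===== SOURCE B (Python) =====
-- def number_classification(nums):
--     positive, negative, even, odd = [], [], [], []
--     for n in nums:
--         s = str(n)
--         (positive if n >= 0 else negative).append(s)
--         (even if n % 2 == 0 else odd).append(s)
--     return f"Positive: {', '.join(positive)}\n"\
--            f"Negative: {', '.join(negative)}\n"\
--            f"Even: {', '.join(even)}\n"\
--            f"Odd: {', '.join(odd)}"
-- ===== Notes on version B (the rewrite author's own statement) =====
-- stated objective: faster
-- what changed: Replaces four separate comprehension scans of nums (each calling str again) with one pass maintaining four accumulator lists, calling str(n) once per element.
import Mathlib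
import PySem

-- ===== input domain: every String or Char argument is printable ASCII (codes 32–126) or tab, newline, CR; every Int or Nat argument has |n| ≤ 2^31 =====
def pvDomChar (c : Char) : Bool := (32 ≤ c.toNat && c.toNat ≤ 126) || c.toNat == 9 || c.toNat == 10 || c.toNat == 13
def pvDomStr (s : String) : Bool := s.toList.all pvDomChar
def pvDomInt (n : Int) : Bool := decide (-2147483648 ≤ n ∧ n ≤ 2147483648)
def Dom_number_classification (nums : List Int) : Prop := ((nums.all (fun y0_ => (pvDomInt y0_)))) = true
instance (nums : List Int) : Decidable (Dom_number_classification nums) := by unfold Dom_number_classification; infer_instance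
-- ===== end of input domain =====

-- B makes one pass maintaining four accumulator lists instead of A's four separate comprehension scans.
-- ===== PORT A =====
def number_classification (nums : List Int) : String :=
  let nums_list_positive := (nums.filter (fun n => n ≥ 0)).map PySem.Int.toStr
  let nums_list_negative := (nums.filter (fun n => n < 0)).map PySem.Int.toStr
  let nums_list_even := (nums.filter (fun n => PySem.Int.mod n 2 = 0)).map PySem.Int.toStr
  let nums_list_odd := (nums.filter (fun n => PySem.Int.mod n 2 ≠ 0)).map PySem.Int.toStr
  "Positive: " ++ PySem.Str.join ", " nums_list_positive ++ "\n" ++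
  "Negative: " ++ PySem.Str.join ", " nums_list_negative ++ "\n" ++
  "Even: " ++ PySem.Str.join ", " nums_list_even ++ "\n" ++
  "Odd: " ++ PySem.Str.join ", " nums_list_odd

-- ===== PORT B =====
def ncStep (acc : List String × List String × List String × List String) (n : Int) :
    List String × List String × List String × List String :=
  let s := PySem.Int.toStr n
  let (positive, negative, even, odd) := acc
  let (positive, negative) := if n ≥ 0 then (positive ++ [s], negative) else (positive, negative ++ [s])
  let (even, odd) := if PySem.Int.mod n 2 = 0 then (even ++ [s], odd) else (even, odd ++ [s])
  (positive, negative, even, odd)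

def number_classification_alt (nums : List Int) : String :=
  let (positive, negative, even, odd) := nums.foldl ncStep ([], [], [], [])
  "Positive: " ++ PySem.Str.join ", " positive ++ "\n" ++
  "Negative: " ++ PySem.Str.join ", " negative ++ "\n" ++
  "Even: " ++ PySem.Str.join ", " even ++ "\n" ++
  "Odd: " ++ PySem.Str.join ", " odd

-- ===== PRECONDITION & SPEC =====
def Spec_number_classification (nums : List Int) (out : String) : Prop := out = number_classification_alt nums
instance (nums : List Int) (out : String) : Decidable (Spec_number_classification nums out) := by unfold Spec_number_classification; infer_instance

-- ===== CLAIM (what is proved, stated in full; the proofs are below) =====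
def Claim_equal_number_classification : Prop := ∀ (nums : List Int), Dom_number_classification nums → Spec_number_classification nums (number_classification nums)

-- ===== LEMMAS AND PROOFS =====

-- ===== VERDICT (by name: the statement is the Claim_ definition above) =====
lemma ncStep_foldl (nums : List Int) (p ng e o : List String) :
    nums.foldl ncStep (p, ng, e, o) =
      (p ++ (nums.filter (fun n => n ≥ 0)).map PySem.Int.toStr,
       ng ++ (nums.filter (fun n => n < 0)).map PySem.Int.toStr,
       e ++ (nums.filter (fun n => PySem.Int.mod n 2 = 0)).map PySem.Int.toStr,
       o ++ (nums.filter (fun n => PySem.Int.mod n 2 ≠ 0)).map PySem.Int.toStr) := by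
  induction nums generalizing p ng e o with
  | nil => simp
  | cons x xs ih =>
    simp only [List.foldl_cons, ncStep, List.filter_cons]
    by_cases h1 : (0:Int) ≤ x <;> by_cases h2 : (2:Int) ∣ x
    · simp [h1, h2, ih, PySem.Int.mod_eq_zero_iff_dvd, not_lt.mpr h1]
    · simp [h1, h2, ih, PySem.Int.mod_eq_zero_iff_dvd, not_lt.mpr h1]
    · simp [Int.not_le.mp h1, h1, h2, ih, PySem.Int.mod_eq_zero_iff_dvd]
    · simp [Int.not_le.mp h1, h1, h2, ih, PySem.Int.mod_eq_zero_iff_dvd]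

theorem number_classification_spec : Claim_equal_number_classification := by
  intro nums _
  unfold Spec_number_classification number_classification number_classification_alt
  rw [ncStep_foldl]
  simp
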